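-- pv_equiv track=rewrite | github.com/savinbot/testbot | utils.py | get_same_ads
-- ===== SOURCE A (Python) =====
-- def get_same_ads(list_of_ads, payment_methods):
--     if len(list_of_ads) == 1:
--         return list_of_ads
--
--     else:
--         list_of_same_ads = []
--
--         for ad in list_of_ads:
--             if ad[0] in payment_methods:
--                 try:
--                     if ad[0] == list_of_same_ads[0][0]:
--                         list_of_same_ads.append(ad)
--                 except IndexError:
--                     list_of_same_ads.append(ad)
--
--         return list_of_same_ads
-- ===== SOURCE B (Python) =====
-- def get_same_ads(list_of_ads, payment_methods):
--     if len(list_of_ads) == 1: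
--         return list_of_ads
--     anchor = None
--     for ad in list_of_ads:
--         if ad[0] in payment_methods:
--             anchor = ad[0]
--             break
--     if anchor is None:
--         return []
--     return [ad for ad in list_of_ads if ad[0] == anchor]
-- ===== Notes on version B (the rewrite author's own statement) =====
-- stated objective: simpler
-- what changed: Replaces A's single stateful pass with try/except-driven control flow by a two-phase decomposition: first find the anchor payment method (head of the earliest ad whose head is in payment_methods), then filter all ads whose head equals the anchor.
import Mathlib
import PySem

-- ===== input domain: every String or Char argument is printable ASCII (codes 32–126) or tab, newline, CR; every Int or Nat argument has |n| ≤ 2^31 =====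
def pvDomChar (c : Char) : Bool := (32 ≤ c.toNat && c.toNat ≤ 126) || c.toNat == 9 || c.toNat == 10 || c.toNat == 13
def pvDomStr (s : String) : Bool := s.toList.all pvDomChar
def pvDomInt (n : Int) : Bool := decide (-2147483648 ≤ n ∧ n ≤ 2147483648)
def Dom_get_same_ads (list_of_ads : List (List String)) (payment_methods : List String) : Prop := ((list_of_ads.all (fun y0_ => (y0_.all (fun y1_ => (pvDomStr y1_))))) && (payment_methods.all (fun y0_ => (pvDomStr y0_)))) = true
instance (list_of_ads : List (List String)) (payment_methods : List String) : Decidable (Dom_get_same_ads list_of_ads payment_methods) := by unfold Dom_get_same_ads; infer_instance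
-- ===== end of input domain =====

-- B replaces A's stateful single pass with try/except control flow by a find-anchor phase
-- followed by a filter phase (objective: simpler); same return values on Pre_.


-- ===== PORT A =====
-- one loop step of A: 'if ad[0] in payment_methods: try: if ad[0] == list_of_same_ads[0][0]:
-- append except IndexError: append'  (ad[0] / list_of_same_ads[0][0] via pyGet?; none = IndexError)
def get_same_ads_stepA (payment_methods : List String) (acc : List (List String)) (ad : List String) : List (List String) :=
  match PySem.List.pyGet? ad 0 with
  | none => acc          -- ad[0] raises IndexError (outside Pre_; Python A raises here)
  | some h =>
    if payment_methods.contains h then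
      match acc with
      | [] => acc ++ [ad]                 -- list_of_same_ads[0] raises IndexError → except branch appends
      | first :: _ =>
        match PySem.List.pyGet? first 0 with
        | none => acc                      -- unreachable: appended ads are nonempty
        | some h0 => if h == h0 then acc ++ [ad] else acc
    else acc

def get_same_ads (list_of_ads : List (List String)) (payment_methods : List String) : List (List String) :=
  if list_of_ads.length = 1 then list_of_ads
  else list_of_ads.foldl (get_same_ads_stepA payment_methods) []

-- ===== PORT B =====
-- B: find the anchor (head of first ad whose head is in payment_methods), then filter by it.
-- ad[0] ported as head? (the index is the literal 0); on Pre_ every ad is nonempty, so this is exact.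
def get_same_ads_alt (list_of_ads : List (List String)) (payment_methods : List String) : List (List String) :=
  if list_of_ads.length = 1 then list_of_ads
  else
    match list_of_ads.find? (fun ad => match ad.head? with | some h => payment_methods.contains h | none => false) with
    | none => []
    | some a => list_of_ads.filter (fun ad => ad.head? == a.head?)

-- ===== PRECONDITION & SPEC =====
-- Pre_ excludes exactly the inputs where Python A raises IndexError: an empty ad when len(list_of_ads) ≠ 1.
def Pre_get_same_ads (list_of_ads : List (List String)) (payment_methods : List String) : Prop :=
  list_of_ads.length = 1 ∨ ∀ ad ∈ list_of_ads, ad ≠ []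
instance (list_of_ads : List (List String)) (payment_methods : List String) : Decidable (Pre_get_same_ads list_of_ads payment_methods) := by unfold Pre_get_same_ads; infer_instance

def pvWitness_get_same_ads : List (List String) × List String :=
  ([["card", "x"], ["cash", "y"], ["card", "z"]], ["card"])

def Spec_get_same_ads (list_of_ads : List (List String)) (payment_methods : List String) (out : List (List String)) : Prop := out = get_same_ads_alt list_of_ads payment_methods
instance (list_of_ads : List (List String)) (payment_methods : List String) (out : List (List String)) : Decidable (Spec_get_same_ads list_of_ads payment_methods out) := by unfold Spec_get_same_ads; infer_instance

-- ===== CLAIM (what is proved, stated in full; the proofs are below) =====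
def Claim_equal_get_same_ads : Prop := ∀ (list_of_ads : List (List String)) (payment_methods : List String), Dom_get_same_ads list_of_ads payment_methods → Pre_get_same_ads list_of_ads payment_methods → Spec_get_same_ads list_of_ads payment_methods (get_same_ads list_of_ads payment_methods)

-- ===== LEMMAS AND PROOFS =====

lemma get_same_ads_step_notin (pm : List String) (h : String) (ad' : List String)
    (hc : pm.contains h = false) (acc : List (List String)) :
    get_same_ads_stepA pm acc (h :: ad') = acc := by
  have hc' := by simpa using hc
  simp [get_same_ads_stepA, PySem.List.pyGet?, PySem.List.pyIdx?, hc']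

lemma get_same_ads_step_other (pm : List String) (h : String) (ad' first : List String)
    (tl : List (List String)) (anchor : String) (hfirst : first.head? = some anchor)
    (heq : h ≠ anchor) :
    get_same_ads_stepA pm (first :: tl) (h :: ad') = first :: tl := by
  obtain ⟨f, fr, rfl⟩ : ∃ f fr, first = f :: fr := by
    cases first with | nil => simp at hfirst | cons a b => exact ⟨a, b, rfl⟩
  simp at hfirst; subst hfirst
  simp [get_same_ads_stepA, PySem.List.pyGet?, PySem.List.pyIdx?, heq]

lemma get_same_ads_step_match (pm : List String) (h : String) (ad' first : List String)
    (tl : List (List String)) (hc : pm.contains h = true) (hfirst : first.head? = some h) :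
    get_same_ads_stepA pm (first :: tl) (h :: ad') = first :: (tl ++ [h :: ad']) := by
  obtain ⟨f, fr, rfl⟩ : ∃ f fr, first = f :: fr := by
    cases first with | nil => simp at hfirst | cons a b => exact ⟨a, b, rfl⟩
  simp at hfirst; subst hfirst
  have hc' := by simpa using hc
  simp [get_same_ads_stepA, PySem.List.pyGet?, PySem.List.pyIdx?, hc']

lemma get_same_ads_step_first (pm : List String) (h : String) (ad' : List String)
    (hc : pm.contains h = true) :
    get_same_ads_stepA pm [] (h :: ad') = [h :: ad'] := by
  have hc' := by simpa using hc
  simp [get_same_ads_stepA, PySem.List.pyGet?, PySem.List.pyIdx?, hc']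

-- once the accumulator is nonempty with head-of-head = anchor ∈ payment_methods,
-- A's fold appends exactly the ads whose head equals the anchor
lemma get_same_ads_fold_filled (pm : List String) (anchor : String)
    (hpm : pm.contains anchor = true) :
    ∀ (l : List (List String)) (first : List String) (tl : List (List String)),
      first.head? = some anchor → (∀ ad ∈ l, ad ≠ []) →
      l.foldl (get_same_ads_stepA pm) (first :: tl)
        = (first :: tl) ++ l.filter (fun ad => ad.head? == some anchor) := by
  intro l
  induction l with
  | nil => intro first tl _ _; simp
  | cons ad l ih =>
    intro first tl hfirst hne
    obtain ⟨h, ad', rfl⟩ : ∃ h ad', ad = h :: ad' := by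
      cases ad with
      | nil => exact absurd rfl (hne [] (by simp))
      | cons h t => exact ⟨h, t, rfl⟩
    have hne' : ∀ a ∈ l, a ≠ [] := fun a ha => hne a (List.mem_cons_of_mem _ ha)
    simp only [List.foldl_cons, List.filter_cons]
    by_cases heq : h = anchor
    · subst heq
      rw [get_same_ads_step_match pm h ad' first tl hpm hfirst]
      rw [ih first (tl ++ [h :: ad']) hfirst hne']
      simp
    · by_cases hc : pm.contains h = true
      · rw [get_same_ads_step_other pm h ad' first tl anchor hfirst heq,
            ih first tl hfirst hne']
        simpa using heq
      · rw [get_same_ads_step_notin pm h ad' (by simpa using hc),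
            ih first tl hfirst hne']
        simpa using heq

-- from the empty accumulator, A's fold computes B's find-then-filter result
lemma get_same_ads_fold_empty (pm : List String) :
    ∀ (l : List (List String)), (∀ ad ∈ l, ad ≠ []) →
      l.foldl (get_same_ads_stepA pm) []
        = match l.find? (fun ad => match ad.head? with | some h => pm.contains h | none => false) with
          | none => []
          | some a => l.filter (fun ad => ad.head? == a.head?) := by
  intro l
  induction l with
  | nil => intro _; simp
  | cons ad l ih =>
    intro hne
    obtain ⟨h, ad', rfl⟩ : ∃ h ad', ad = h :: ad' := by
      cases ad with
      | nil => exact absurd rfl (hne [] (by simp))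
      | cons h t => exact ⟨h, t, rfl⟩
    have hne' : ∀ a ∈ l, a ≠ [] := fun a ha => hne a (List.mem_cons_of_mem _ ha)
    by_cases hc : pm.contains h = true
    · -- the first ad is the anchor
      have hfind : ((h :: ad') :: l).find?
          (fun ad => match ad.head? with | some h => pm.contains h | none => false)
          = some (h :: ad') := by
        have hc' : h ∈ pm := by simpa using hc
        simp [List.find?, hc']
      rw [hfind]
      simp only [List.foldl_cons]
      rw [get_same_ads_step_first pm h ad' hc,
          get_same_ads_fold_filled pm h hc l (h :: ad') [] (by simp) hne']
      simp
    · -- the first ad is skipped by both programs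
      have hfind : ((h :: ad') :: l).find?
          (fun ad => match ad.head? with | some h => pm.contains h | none => false)
          = l.find? (fun ad => match ad.head? with | some h => pm.contains h | none => false) := by
        have hc' : h ∉ pm := by simpa using hc
        simp [List.find?, hc']
      simp only [List.foldl_cons]
      rw [get_same_ads_step_notin pm h ad' (by simpa using hc), ih hne', hfind]
      cases hf : l.find? (fun ad => match ad.head? with | some h => pm.contains h | none => false) with
      | none => rfl
      | some a =>
        have hpa := List.find?_some hf
        obtain ⟨ha, hca⟩ : ∃ ha, a.head? = some ha ∧ pm.contains ha = true := by
          cases hah : a.head? with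
          | none => simp [hah] at hpa
          | some x => exact ⟨x, rfl, by simpa [hah] using hpa⟩
        have hdrop : ((h :: ad').head? == a.head?) = false := by
          rcases hca with ⟨hah, hcon⟩
          simp [hah]
          intro e
          exact absurd (e ▸ hcon) (by simpa using hc)
        simp only [List.filter_cons, hdrop]
        simp

-- ===== VERDICT (by name: the statement is the Claim_ definition above) =====
theorem get_same_ads_spec : Claim_equal_get_same_ads := by
  intro l pm _ hpre
  unfold Spec_get_same_ads get_same_ads get_same_ads_alt
  by_cases hlen : l.length = 1
  · simp [hlen]
  · have hne : ∀ ad ∈ l, ad ≠ [] := hpre.resolve_left hlen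
    simp only [hlen, if_false]
    exact get_same_ads_fold_empty pm l hne
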